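-- pv_equiv track=rewrite | github.com/Nico-dhls/timetrac | main.py | collect_recent_values
-- ===== SOURCE A (Python) =====
-- MAX_RECENTS = 10
--
-- def collect_recent_values(entries, field):
--     values = []
--     for day in sorted(entries.keys(), reverse=True):
--         for entry in reversed(entries[day]):
--             value = entry.get(field, "")
--             if value and value not in values:
--                 values.append(value)
--             if len(values) >= MAX_RECENTS:
--                 return values
--     return values
-- ===== SOURCE B (Python) =====
-- MAX_RECENTS = 10
--
-- def collect_recent_values(entries, field):
--     # Build the full ordered candidate sequence first, then dedup and truncate.
--     candidates = [entry.get(field, "")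
--                   for day in sorted(entries, reverse=True)
--                   for entry in reversed(entries[day])]
--     nonempty = [v for v in candidates if v]
--     return list(dict.fromkeys(nonempty))[:MAX_RECENTS]
-- ===== Notes on version B (the rewrite author's own statement) =====
-- stated objective: alternative
-- what changed: B replaces A's interleaved accumulate-with-early-return nested loops by a pipeline: one flattening pass builds the ordered candidate list, truthy values are filtered, dict.fromkeys deduplicates preserving first occurrence, and the result is sliced to 10.
import Mathlib
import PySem

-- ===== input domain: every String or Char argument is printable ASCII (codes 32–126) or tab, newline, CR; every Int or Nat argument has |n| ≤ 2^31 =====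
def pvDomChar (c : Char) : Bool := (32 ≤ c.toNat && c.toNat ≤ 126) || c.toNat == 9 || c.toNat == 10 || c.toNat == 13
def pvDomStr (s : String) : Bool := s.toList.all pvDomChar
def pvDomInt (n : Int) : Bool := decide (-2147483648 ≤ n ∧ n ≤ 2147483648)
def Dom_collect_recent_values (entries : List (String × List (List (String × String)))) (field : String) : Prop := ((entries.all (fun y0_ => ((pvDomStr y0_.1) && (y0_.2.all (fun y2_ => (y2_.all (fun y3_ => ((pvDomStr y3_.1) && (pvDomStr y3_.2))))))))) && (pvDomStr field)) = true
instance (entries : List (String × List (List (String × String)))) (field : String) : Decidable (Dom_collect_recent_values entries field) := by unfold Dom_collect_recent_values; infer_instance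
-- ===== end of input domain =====

-- B builds the full ordered candidate list in one flattening pass, filters out empty values,
-- deduplicates with dict.fromkeys and slices to 10, instead of A's interleaved
-- accumulate-with-early-return nested loops (alternative decomposition, same cost).

-- ===== PORT A =====
-- 'if value and value not in values: values.append(value)'
def pvStep (values : List String) (value : String) : List String :=
  if value ≠ "" ∧ value ∉ values then values ++ [value] else values

-- inner 'for entry in reversed(entries[day]):' loop; the Bool says whether the early 'return' fired
def pvInnerA (field : String) : List (List (String × String)) → List String → (List String × Bool)
  | [], values => (values, false)
  | e :: rest, values =>
    let value := (PySem.Dict.ofList e).getD field ""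
    let values' := pvStep values value
    if 10 ≤ values'.length then (values', true) else pvInnerA field rest values'

-- outer 'for day in sorted(entries.keys(), reverse=True):' loop
def pvOuterA (d : PySem.Dict String (List (List (String × String)))) (field : String) :
    List String → List String → List String
  | [], values => values
  | day :: days, values =>
    match pvInnerA field (d.getD day []).reverse values with
    | (values', true) => values'
    | (values', false) => pvOuterA d field days values'

def collect_recent_values (entries : List (String × List (List (String × String)))) (field : String) : List String :=
  let d := PySem.Dict.ofList entries
  pvOuterA d field (PySem.List.sorted d.keys (fun x => x) true) []

-- ===== PORT B =====
def collect_recent_values_alt (entries : List (String × List (List (String × String)))) (field : String) : List String :=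
  let d := PySem.Dict.ofList entries
  let days := PySem.List.sorted d.keys (fun x => x) true
  let candidates := days.flatMap (fun day => (d.getD day []).reverse.map (fun e => (PySem.Dict.ofList e).getD field ""))
  let nonempty := candidates.filter (fun v => !(v == ""))
  (PySem.List.dedup nonempty).take 10

-- ===== PRECONDITION & SPEC =====
def Spec_collect_recent_values (entries : List (String × List (List (String × String)))) (field : String) (out : List String) : Prop := out = collect_recent_values_alt entries field
instance (entries : List (String × List (List (String × String)))) (field : String) (out : List String) : Decidable (Spec_collect_recent_values entries field out) := by unfold Spec_collect_recent_values; infer_instance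

-- ===== CLAIM (what is proved, stated in full; the proofs are below) =====
def Claim_equal_collect_recent_values : Prop := ∀ (entries : List (String × List (List (String × String)))) (field : String), Dom_collect_recent_values entries field → Spec_collect_recent_values entries field (collect_recent_values entries field)

-- ===== LEMMAS AND PROOFS =====

-- A's whole nested loop, rephrased as one early-stopping pass over the flat candidate list
def pvStepAll : List String → List String → List String
  | [], vs => vs
  | v :: cs, vs =>
    let vs' := pvStep vs v
    if 10 ≤ vs'.length then vs' else pvStepAll cs vs'

theorem pvStep_length_le (vs : List String) (v : String) :
    (pvStep vs v).length ≤ vs.length + 1 := by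
  unfold pvStep; split <;> simp

theorem pvInnerA_eq (field : String) (es : List (List (String × String))) :
    ∀ vs : List String, vs.length < 10 →
      pvInnerA field es vs =
        (pvStepAll (es.map (fun e => (PySem.Dict.ofList e).getD field "")) vs,
         decide (10 ≤ (pvStepAll (es.map (fun e => (PySem.Dict.ofList e).getD field "")) vs).length)) := by
  induction es with
  | nil =>
    intro vs h
    simp only [pvInnerA, List.map_nil, pvStepAll]
    rw [decide_eq_false (by omega)]
  | cons e rest ih =>
    intro vs h
    simp only [pvInnerA, List.map_cons, pvStepAll]
    by_cases hl : 10 ≤ (pvStep vs ((PySem.Dict.ofList e).getD field "")).length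
    · simp [hl]
    · simp only [if_neg hl]
      exact ih _ (by omega)

theorem pvStepAll_append (cs1 cs2 : List String) :
    ∀ vs : List String, vs.length < 10 →
      pvStepAll (cs1 ++ cs2) vs =
        (if 10 ≤ (pvStepAll cs1 vs).length then pvStepAll cs1 vs else pvStepAll cs2 (pvStepAll cs1 vs)) := by
  induction cs1 with
  | nil =>
    intro vs h
    rw [List.nil_append]
    simp only [pvStepAll]
    rw [if_neg (by omega)]
  | cons c cs ih =>
    intro vs h
    rw [List.cons_append]
    simp only [pvStepAll]
    by_cases hl : 10 ≤ (pvStep vs c).length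
    · rw [if_pos hl, if_pos hl, if_pos hl]
    · rw [if_neg hl, if_neg hl]
      exact ih _ (by omega)

theorem pvOuterA_eq (d : PySem.Dict String (List (List (String × String)))) (field : String)
    (days : List String) :
    ∀ vs : List String, vs.length < 10 →
      pvOuterA d field days vs =
        pvStepAll (days.flatMap (fun day => (d.getD day []).reverse.map (fun e => (PySem.Dict.ofList e).getD field ""))) vs := by
  induction days with
  | nil => intro vs h; simp only [pvOuterA, List.flatMap_nil, pvStepAll]
  | cons day days ih =>
    intro vs h
    rw [List.flatMap_cons, pvStepAll_append _ _ vs h]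
    simp only [pvOuterA]
    rw [pvInnerA_eq field _ vs h]
    by_cases hl : 10 ≤ (pvStepAll ((d.getD day []).reverse.map (fun e => (PySem.Dict.ofList e).getD field "")) vs).length
    · rw [decide_eq_true hl, if_pos hl]
    · rw [decide_eq_false hl, if_neg hl]
      exact ih _ (by omega)

theorem pvFoldl_prefix (cs : List String) : ∀ vs : List String, vs <+: cs.foldl pvStep vs := by
  induction cs with
  | nil => intro vs; simp
  | cons c cs ih =>
    intro vs
    rw [List.foldl_cons]
    refine List.IsPrefix.trans ?_ (ih (pvStep vs c))
    unfold pvStep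
    split <;> simp

theorem pvStepAll_eq_take (cs : List String) :
    ∀ vs : List String, vs.length < 10 → pvStepAll cs vs = (cs.foldl pvStep vs).take 10 := by
  induction cs with
  | nil =>
    intro vs h
    rw [List.foldl_nil, List.take_of_length_le (by omega)]
    rfl
  | cons c cs ih =>
    intro vs h
    simp only [pvStepAll]
    rw [List.foldl_cons]
    by_cases hl : 10 ≤ (pvStep vs c).length
    · have hlen : (pvStep vs c).length = 10 := by
        have := pvStep_length_le vs c; omega
      obtain ⟨t, ht⟩ := pvFoldl_prefix cs (pvStep vs c)
      rw [if_pos hl, ← ht, ← hlen, List.take_left]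
    · rw [if_neg hl]
      exact ih _ (by omega)

theorem pvFoldl_step_eq_add (cs : List String) :
    ∀ vs : List String, cs.foldl pvStep vs = (cs.filter (fun v => !(v == ""))).foldl PySem.Set.add vs := by
  induction cs with
  | nil => intro vs; simp
  | cons c cs ih =>
    intro vs
    by_cases hc : c = ""
    · simp [hc, pvStep, ih]
    · rw [List.foldl_cons, List.filter_cons, if_pos (by simp [hc]), List.foldl_cons, ih]
      congr 1
      rw [PySem.Set.add_eq_ite]
      unfold pvStep
      by_cases hm : c ∈ vs <;> simp [hm, hc]

-- ===== VERDICT (by name: the statement is the Claim_ definition above) =====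
theorem collect_recent_values_spec : Claim_equal_collect_recent_values := by
  intro entries field _
  unfold Spec_collect_recent_values
  simp only [collect_recent_values, collect_recent_values_alt]
  rw [pvOuterA_eq _ _ _ [] (by simp), pvStepAll_eq_take _ _ (by simp), pvFoldl_step_eq_add]
  rw [PySem.List.dedup_eq_ofList, PySem.Set.ofList_eq_foldl]
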